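-- pv_equiv track=rewrite | github.com/matta-research-group/QCflow | fragments.py | make_trimer_dic
-- ===== SOURCE A (Python) =====
-- import itertools
--
-- def make_trimer_smiles(a, b):
--     """
--     Combines two fragments to make a trimer with both the aba and bab
--     configuration produced
--
--     a : SMILE string of a fragment with attachment points
--
--     b : SMILE string of a fragment with attachment points
--     """
--     aba = a.format('', '8') + '.' + b.format('8', '9') + '.' + a.format('9', '')
--     bab = b.format('', '8') + '.' + a.format('8', '9') + '.' + b.format('9', '')
--     return aba, bab
--
-- def make_trimer_dic(fragment_dic):
--
--     """
--     When provided the fragment dictionary, generates SMILES for all possible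
--     trimers (ABA & BAB) and returns dictionary of trimers.
--
--     Where the key is the name of the trimer, if fragment 0 is combined with
--     fragment 1 then the name is 0_1_0 & 1_0_1.
--
--     The value is the SMILE string of the trimer
--
--     fragment_dic : The dictionary of all the fragments
--     """
--
--     mol_smiles = [make_trimer_smiles(v1, v2)
--                     for v1, v2 in itertools.combinations(fragment_dic.values(), r=2)]
--     #Makes all the possible trimers aba and bab
--     k1k2k1 = []
--     k2k1k2 = []
--     for seperate in mol_smiles:
--         aba = seperate[0]
--         bab = seperate[1]
--
--         k1k2k1.append(aba)
--         k2k1k2.append(bab)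
--     #Makes the two lists of aba and bab
--
--     aba = [(f'{k1}_{k2}_{k1}')
--                     for k1, k2 in itertools.combinations(fragment_dic.keys(), r=2)]
--     #combinations of keys for aba
--     bab = [(f'{k2}_{k1}_{k2}')
--                     for k1, k2 in itertools.combinations(fragment_dic.keys(), r=2)]
--     #combinations of keys for bab
--     aba_dic = { k : v for k, v in zip(aba, k1k2k1) }
--     #Makes dictionary of all the aba keys with the aba trimers
--     bab_dic = { k : v for k, v in zip(bab, k2k1k2) }
--     #Makes dicitionary of all the bab keys with the bab trimers
--     trimer_dic = aba_dic | bab_dic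
--     #Combines these two dictionaries together
--     return trimer_dic
-- ===== SOURCE B (Python) =====
-- def make_trimer_dic(fragment_dic):
--     """
--     Same result as the original, by structural recursion: peel off the head
--     fragment, record its pairings with every later fragment directly into the
--     two accumulator dicts, then recurse on the tail; finally merge bab into aba
--     (so every aba entry precedes every bab entry, matching 'aba_dic | bab_dic').
--     """
--     def trimer(u, w):
--         # u at the two outer positions, w in the middle
--         return u.format('', '8') + '.' + w.format('8', '9') + '.' + u.format('9', '')
--
--     def go(items, aba_dic, bab_dic):
--         if len(items) < 2:
--             return
--         k1, v1 = items[0]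
--         for k2, v2 in items[1:]:
--             aba_dic[f'{k1}_{k2}_{k1}'] = trimer(v1, v2)
--             bab_dic[f'{k2}_{k1}_{k2}'] = trimer(v2, v1)
--         go(items[1:], aba_dic, bab_dic)
--
--     aba_dic, bab_dic = {}, {}
--     go(list(fragment_dic.items()), aba_dic, bab_dic)
--     aba_dic.update(bab_dic)
--     return aba_dic
-- ===== Notes on version B (the rewrite author's own statement) =====
-- stated objective: alternative
-- what changed: B replaces A's staged pipeline (four separate itertools.combinations comprehension passes, an append loop, a zip into two dict comprehensions and a '|' merge) by a single structural recursion over the item list that peels off the head fragment, writes its pairings with each later fragment straight into two accumulator dicts, recurses on the tail, and merges once; it also computes each trimer string with one single-orientation helper called twice with swapped arguments instead of A's pair-producing helper.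
import Mathlib
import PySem

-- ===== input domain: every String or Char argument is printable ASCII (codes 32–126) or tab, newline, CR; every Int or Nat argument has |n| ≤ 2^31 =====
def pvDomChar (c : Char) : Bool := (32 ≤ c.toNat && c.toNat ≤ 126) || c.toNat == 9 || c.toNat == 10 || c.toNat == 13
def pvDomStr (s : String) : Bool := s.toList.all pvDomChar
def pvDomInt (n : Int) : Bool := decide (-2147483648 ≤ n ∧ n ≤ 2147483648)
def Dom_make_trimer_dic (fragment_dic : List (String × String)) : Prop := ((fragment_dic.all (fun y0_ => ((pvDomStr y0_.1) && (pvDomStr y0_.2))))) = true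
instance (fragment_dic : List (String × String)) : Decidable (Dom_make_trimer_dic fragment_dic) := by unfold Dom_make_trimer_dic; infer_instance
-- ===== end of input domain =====

-- B replaces A's staged pipeline (four combination comprehension passes, an append loop, a zip into
-- two dicts merged with '|') by one structural recursion over the item list that writes the head
-- fragment's pairings straight into two accumulator dicts and recurses on the tail (objective:
-- alternative decomposition; same O(n^2) cost, a timing run reported no speed difference).

-- ===== PORT A =====

-- itertools.combinations(l, r=2), in itertools order
def pvCombs2 {α : Type} : List α → List (α × α)
  | [] => []
  | x :: xs => xs.map (fun y => (x, y)) ++ pvCombs2 xs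

-- hand port of s.format(x, y) (no PySem primitive): consumes one argument per auto-numbered '{}'
-- field, copying all other characters.  Exact on the Pre_ domain (braces occur only as the exact
-- substring '{}', at most two fields); elsewhere Python's str.format raises or ('{{', '{0}', '{:…}')
-- returns a value this port does not reproduce — such inputs are outside Pre_.
def pvFmt : List Char → List (List Char) → List Char
  | [], _ => []
  | [c], _ => [c]
  | c1 :: c2 :: rest, args =>
    if c1 = '{' ∧ c2 = '}' then
      match args with
      | a :: args' => a ++ pvFmt rest args'
      | [] => c1 :: c2 :: pvFmt rest []   -- Python raises IndexError here (outside Pre_)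
    else c1 :: pvFmt (c2 :: rest) args

-- f'{k1}_{k2}_{k1}' (string concatenation done on char lists, exact)
def pvTriKey (k1 k2 : String) : String :=
  String.ofList (k1.toList ++ '_' :: k2.toList ++ '_' :: k1.toList)

def make_trimer_smiles (a b : String) : String × String :=
  let aba := String.ofList (pvFmt a.toList [[], ['8']] ++ '.' :: pvFmt b.toList [['8'], ['9']] ++ '.' :: pvFmt a.toList [['9'], []])
  let bab := String.ofList (pvFmt b.toList [[], ['8']] ++ '.' :: pvFmt a.toList [['8'], ['9']] ++ '.' :: pvFmt b.toList [['9'], []])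
  (aba, bab)

def make_trimer_dic (fragment_dic : List (String × String)) : List (String × String) :=
  let d := PySem.Dict.ofList fragment_dic
  let mol_smiles := (pvCombs2 d.values).map (fun p => make_trimer_smiles p.1 p.2)
  -- for seperate in mol_smiles: k1k2k1.append(aba); k2k1k2.append(bab)
  let lists := mol_smiles.foldl (fun acc sep => (acc.1 ++ [sep.1], acc.2 ++ [sep.2])) ([], [])
  let k1k2k1 := lists.1
  let k2k1k2 := lists.2
  let aba := (pvCombs2 d.keys).map (fun p => pvTriKey p.1 p.2)
  let bab := (pvCombs2 d.keys).map (fun p => pvTriKey p.2 p.1)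
  let aba_dic := PySem.Dict.ofList (aba.zip k1k2k1)
  let bab_dic := PySem.Dict.ofList (bab.zip k2k1k2)
  let trimer_dic := aba_dic.update bab_dic.items   -- aba_dic | bab_dic
  trimer_dic.items

-- ===== PORT B =====

-- trimer(u, w) = u.format('','8') + '.' + w.format('8','9') + '.' + u.format('9','')
-- (str.format ported by pvFmt as in A; string concatenation done on char lists, exact)
def pvTrimer (u w : String) : String :=
  String.ofList (pvFmt u.toList [[], ['8']] ++ '.' :: pvFmt w.toList [['8'], ['9']] ++ '.' :: pvFmt u.toList [['9'], []])

-- go(items, aba_dic, bab_dic): the inner 'for k2, v2 in items[1:]' loop is the foldl over rest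
-- mutating the two accumulator dicts, then the tail call
def pvGo : List (String × String) → PySem.Dict String String × PySem.Dict String String → PySem.Dict String String × PySem.Dict String String
  | [], acc => acc
  | [_], acc => acc          -- len(items) < 2: return
  | (k1, v1) :: rest, acc =>
      pvGo rest (rest.foldl (fun a p =>
        (a.1.insert (pvTriKey k1 p.1) (pvTrimer v1 p.2),
         a.2.insert (pvTriKey p.1 k1) (pvTrimer p.2 v1))) acc)

def make_trimer_dic_alt (fragment_dic : List (String × String)) : List (String × String) :=
  let g := pvGo (PySem.Dict.ofList fragment_dic).items (PySem.Dict.empty, PySem.Dict.empty)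
  -- aba_dic.update(bab_dic); return aba_dic
  (g.1.update g.2.items).items

-- ===== PRECONDITION & SPEC =====

-- braces occur only as the exact substring '{}', and at most n of them
def pvClean : List Char → Nat → Bool
  | [], _ => true
  | [c], _ => !(c = '{' || c = '}')
  | c1 :: c2 :: rest, n =>
    if c1 = '{' ∧ c2 = '}' then
      match n with
      | 0 => false
      | Nat.succ m => pvClean rest m
    else !(c1 = '{' || c1 = '}') && pvClean (c2 :: rest) n

-- Pre_ excludes inputs on which str.format raises (stray '{' or '}', three or more '{}' fields:
-- both A and B raise ValueError/IndexError there), and the rare values using str.format features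
-- beyond plain '{}' fields ('{{'/'}}' escapes, explicit indices '{0}', format specs '{:>3}') — on
-- those A and B return the SAME value (both call str.format identically) but the shared pvFmt port
-- of str.format does not model the format mini-language, so the ports are only faithful outside them.
def Pre_make_trimer_dic (fragment_dic : List (String × String)) : Prop :=
  (PySem.Dict.ofList fragment_dic).size ≤ 1 ∨
    ((PySem.Dict.ofList fragment_dic).values.all (fun v => pvClean v.toList 2)) = true
instance (fragment_dic : List (String × String)) : Decidable (Pre_make_trimer_dic fragment_dic) := by
  unfold Pre_make_trimer_dic; infer_instance

def pvWitness_make_trimer_dic : (List (String × String)) := [("0", "{}C{}"), ("1", "{}N{}")]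

def Spec_make_trimer_dic (fragment_dic : List (String × String)) (out : List (String × String)) : Prop := out = make_trimer_dic_alt fragment_dic
instance (fragment_dic : List (String × String)) (out : List (String × String)) : Decidable (Spec_make_trimer_dic fragment_dic out) := by unfold Spec_make_trimer_dic; infer_instance

-- ===== CLAIM (what is proved, stated in full; the proofs are below) =====
def Claim_equal_make_trimer_dic : Prop := ∀ (fragment_dic : List (String × String)), Dom_make_trimer_dic fragment_dic → Pre_make_trimer_dic fragment_dic → Spec_make_trimer_dic fragment_dic (make_trimer_dic fragment_dic)

-- ===== LEMMAS AND PROOFS =====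
-- (the two ports build the same association list for every input, so the proof does not need to
-- case on Pre_; Pre_ delimits where the ports are faithful to their Pythons, see its comment)

-- the aba / bab entry lists both ports end up assembling
def pvAbaEnts (l : List (String × String)) : List (String × String) :=
  (pvCombs2 l).map (fun pr => (pvTriKey pr.1.1 pr.2.1, pvTrimer pr.1.2 pr.2.2))
def pvBabEnts (l : List (String × String)) : List (String × String) :=
  (pvCombs2 l).map (fun pr => (pvTriKey pr.2.1 pr.1.1, pvTrimer pr.2.2 pr.1.2))

theorem pv_combs2_map {α β : Type} (f : α → β) (l : List α) :
    pvCombs2 (l.map f) = (pvCombs2 l).map (Prod.map f f) := by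
  induction l with
  | nil => rfl
  | cons x xs ih => simp [pvCombs2, ih, List.map_map]

theorem pv_foldl_pair {α β γ : Type} (l : List α) (g1 : α → β) (g2 : α → γ) (xs : List β) (ys : List γ) :
    l.foldl (fun (acc : List β × List γ) x => (acc.1 ++ [g1 x], acc.2 ++ [g2 x])) (xs, ys)
      = (xs ++ l.map g1, ys ++ l.map g2) := by
  induction l generalizing xs ys with
  | nil => simp
  | cons p l ih => simp [ih]

-- the inner loop of go splits into the two dict builds
theorem pv_foldl_pair_dict {κ ν α : Type} [BEq κ] (l : List α)
    (f1 f2 : α → κ) (g1 g2 : α → ν) (d1 d2 : PySem.Dict κ ν) :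
    l.foldl (fun (a : PySem.Dict κ ν × PySem.Dict κ ν) p =>
        (a.1.insert (f1 p) (g1 p), a.2.insert (f2 p) (g2 p))) (d1, d2)
      = (PySem.Dict.update d1 (l.map (fun p => (f1 p, g1 p))),
         PySem.Dict.update d2 (l.map (fun p => (f2 p, g2 p)))) := by
  induction l generalizing d1 d2 with
  | nil => rfl
  | cons p l ih => exact ih _ _

theorem pv_update_append {κ ν : Type} [BEq κ] (d : PySem.Dict κ ν) (xs ys : List (κ × ν)) :
    PySem.Dict.update d (xs ++ ys) = PySem.Dict.update (PySem.Dict.update d xs) ys := by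
  simp [PySem.Dict.update, List.foldl_append]

-- characterisation of the recursion: go appends the head's entries, then the tail's
theorem pv_go_eq (l : List (String × String)) (d1 d2 : PySem.Dict String String) :
    pvGo l (d1, d2) = (PySem.Dict.update d1 (pvAbaEnts l), PySem.Dict.update d2 (pvBabEnts l)) := by
  induction l generalizing d1 d2 with
  | nil => rfl
  | cons x l ih =>
    cases l with
    | nil => rfl
    | cons y t =>
      show pvGo (y :: t) _ = _
      rw [pv_foldl_pair_dict]
      rw [ih]
      simp only [pvAbaEnts, pvBabEnts, pvCombs2, List.map_append, List.map_map,
        ← pv_update_append]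
      rfl

-- ===== VERDICT (by name: the statement is the Claim_ definition above) =====
theorem make_trimer_dic_spec : Claim_equal_make_trimer_dic := by
  intro fd _ _
  unfold Spec_make_trimer_dic
  show make_trimer_dic fd = make_trimer_dic_alt fd
  unfold make_trimer_dic make_trimer_dic_alt
  rw [pv_go_eq]
  simp only [PySem.Dict.keys, PySem.Dict.values, pv_combs2_map, List.map_map,
    pv_foldl_pair, List.nil_append, List.zip_map', pvAbaEnts, pvBabEnts]
  rfl
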